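-- pv_equiv track=rewrite | github.com/chris17453/cotas | scripts/generate_compiler_tables.py | generate_spec_offsets_cs
-- ===== SOURCE A (Python) =====
-- def to_pascal_case(s):
--     """Convert snake_case to PascalCase."""
--     return ''.join(w.capitalize() for w in s.split('_'))
--
-- def generate_spec_offsets_cs(offsets):
--     """Generate SpecOffsets.cs with all constants."""
--     lines = []
--     lines.append("// AUTO-GENERATED from specline.pas by generate_compiler_tables.py")
--     lines.append("// DO NOT EDIT MANUALLY")
--     lines.append("")
--     lines.append("namespace CoTAS.Compiler;")
--     lines.append("")
--     lines.append("/// <summary>Spec line byte offsets for each command's parameters.</summary>")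
--     lines.append("public static class SpecOffsets")
--     lines.append("{")
--
--     # Group by prefix (command name)
--     groups = {}
--     for name, val in sorted(offsets.items(), key=lambda x: x[0]):
--         prefix = name.split('_')[0] if '_' in name else name
--         if prefix not in groups:
--             groups[prefix] = []
--         groups[prefix].append((name, val))
--
--     for prefix in sorted(groups.keys()):
--         for name, val in groups[prefix]:
--             cs_name = to_pascal_case(name)
--             lines.append(f"    public const int {cs_name} = {val};")
--
--     lines.append("}")
--
--     return '\n'.join(lines)
-- ===== SOURCE B (Python) =====
-- def to_pascal_case(s):
--     """Convert snake_case to PascalCase."""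
--     return ''.join(w.capitalize() for w in s.split('_'))
--
-- HEADER = [
--     "// AUTO-GENERATED from specline.pas by generate_compiler_tables.py",
--     "// DO NOT EDIT MANUALLY",
--     "",
--     "namespace CoTAS.Compiler;",
--     "",
--     "/// <summary>Spec line byte offsets for each command's parameters.</summary>",
--     "public static class SpecOffsets",
--     "{",
-- ]
--
-- def generate_spec_offsets_cs(offsets):
--     """Generate SpecOffsets.cs with all constants."""
--     body = [
--         f"    public const int {to_pascal_case(name)} = {val};"
--         for name, val in sorted(offsets.items(),
--                                 key=lambda kv: (kv[0].split('_')[0], kv[0]))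
--     ]
--     return '\n'.join(HEADER + body + ["}"])
-- ===== Notes on version B (the rewrite author's own statement) =====
-- stated objective: simpler
-- what changed: B drops A's sort-then-group-into-dict-then-sort-keys-then-nested-emit machinery and instead sorts the items once by the composite key (prefix, name) and emits the constants in one flat comprehension.
import Mathlib
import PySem

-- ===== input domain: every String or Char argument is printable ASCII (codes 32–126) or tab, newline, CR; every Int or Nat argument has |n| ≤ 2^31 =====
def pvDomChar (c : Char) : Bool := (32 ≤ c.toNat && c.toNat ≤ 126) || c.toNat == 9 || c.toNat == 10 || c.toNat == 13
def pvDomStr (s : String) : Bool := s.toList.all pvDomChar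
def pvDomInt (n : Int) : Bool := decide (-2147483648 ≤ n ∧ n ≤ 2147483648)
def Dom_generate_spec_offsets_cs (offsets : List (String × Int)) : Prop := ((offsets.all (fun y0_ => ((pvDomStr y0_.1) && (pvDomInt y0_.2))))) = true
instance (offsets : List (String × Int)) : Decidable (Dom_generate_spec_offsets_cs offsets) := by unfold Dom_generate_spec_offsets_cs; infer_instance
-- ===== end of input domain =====

-- B replaces A's group-by-prefix dict and nested emit loops with a single sort by the
-- composite key (prefix, name) and one flat emit pass; same output, simpler structure.

-- shared helpers: the Python module's to_pascal_case, name.split('_')[0], and the dict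
-- parameter's items() (association list → dict, first binding wins) — used by both programs

-- s.split('_')  (separator non-empty, so Python never raises; exact via PySem.Chars.splitOn)
def pvSplitU (s : String) : List String :=
  (PySem.Chars.splitOn s.toList ['_']).map String.ofList

-- w.capitalize(): first char uppercased, rest lowercased (exact on the ASCII domain)
def pvCap : List Char → List Char
  | [] => []
  | c :: rest => PySem.Chars.upperChar c :: PySem.Chars.lower rest

-- to_pascal_case(s) = ''.join(w.capitalize() for w in s.split('_'))
def to_pascal_case_port (s : String) : String :=
  String.ofList (PySem.Chars.join [] ((PySem.Chars.splitOn s.toList ['_']).map pvCap))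

-- name.split('_')[0]
def keyPre (s : String) : String := PySem.List.pyGetD (pvSplitU s) 0 ""

-- the dict parameter: association list → dict items, FIRST binding wins (how the Python dict is built)
def pvItems (offsets : List (String × Int)) : List (String × Int) :=
  (offsets.foldl (fun d p => d.setdefault p.1 p.2) PySem.Dict.empty).items

-- ===== PORT A =====
def generate_spec_offsets_cs (offsets : List (String × Int)) : String :=
  let lines : List String :=
    ["// AUTO-GENERATED from specline.pas by generate_compiler_tables.py",
     "// DO NOT EDIT MANUALLY",
     "",
     "namespace CoTAS.Compiler;",
     "",
     "/// <summary>Spec line byte offsets for each command's parameters.</summary>",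
     "public static class SpecOffsets",
     "{"]
  let s := PySem.List.sorted (pvItems offsets) (fun x => x.1) false
  let groups : PySem.Dict String (List (String × Int)) :=
    s.foldl (fun g nv =>
      let pfx := if PySem.Str.isIn "_" nv.1 then keyPre nv.1 else nv.1
      let g' := if g.contains pfx then g else g.insert pfx []
      g'.modify pfx [] (fun l => l ++ [nv])) PySem.Dict.empty
  let lines :=
    (PySem.List.sorted groups.keys (fun k => k) false).foldl
      (fun ls pfx =>
        (groups.getD pfx []).foldl (fun ls nv =>
          let cs_name := to_pascal_case_port nv.1
          ls ++ ["    public const int " ++ cs_name ++ " = " ++ PySem.Int.toStr nv.2 ++ ";"]) ls)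
      lines
  PySem.Str.join "\n" (lines ++ ["}"])

-- ===== PORT B =====
def pvHeader : List String :=
  ["// AUTO-GENERATED from specline.pas by generate_compiler_tables.py",
   "// DO NOT EDIT MANUALLY",
   "",
   "namespace CoTAS.Compiler;",
   "",
   "/// <summary>Spec line byte offsets for each command's parameters.</summary>",
   "public static class SpecOffsets",
   "{"]

def generate_spec_offsets_cs_alt (offsets : List (String × Int)) : String :=
  let body :=
    (PySem.List.sorted2 (pvItems offsets) (fun kv => keyPre kv.1) (fun kv => kv.1) false).map
      (fun nv => "    public const int " ++ to_pascal_case_port nv.1 ++ " = " ++ PySem.Int.toStr nv.2 ++ ";")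
  PySem.Str.join "\n" (pvHeader ++ body ++ ["}"])

-- ===== PRECONDITION & SPEC =====
def Spec_generate_spec_offsets_cs (offsets : List (String × Int)) (out : String) : Prop := out = generate_spec_offsets_cs_alt offsets
instance (offsets : List (String × Int)) (out : String) : Decidable (Spec_generate_spec_offsets_cs offsets out) := by unfold Spec_generate_spec_offsets_cs; infer_instance

-- ===== CLAIM (what is proved, stated in full; the proofs are below) =====
def Claim_equal_generate_spec_offsets_cs : Prop := ∀ (offsets : List (String × Int)), Dom_generate_spec_offsets_cs offsets → Spec_generate_spec_offsets_cs offsets (generate_spec_offsets_cs offsets)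

-- ===== LEMMAS AND PROOFS =====

-- proof-local abbreviations
def pvG (g : PySem.Dict String (List (String × Int))) (nv : String × Int) :
    PySem.Dict String (List (String × Int)) :=
  (if g.contains (keyPre nv.1) then g else g.insert (keyPre nv.1) []).modify
    (keyPre nv.1) [] (fun l => l ++ [nv])

def pvLineF (nv : String × Int) : String :=
  "    public const int " ++ to_pascal_case_port nv.1 ++ " = " ++ PySem.Int.toStr nv.2 ++ ";"

def pvS (offsets : List (String × Int)) : List (String × Int) :=
  PySem.List.sorted (pvItems offsets) (fun x => x.1) false

def pvKeysSorted (offsets : List (String × Int)) : List String :=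
  PySem.List.sorted (PySem.Set.ofList ((pvS offsets).map (fun nv => keyPre nv.1))) (fun k => k) false

-- splitOn.go consumes the whole input when the separator never occurs
theorem pv_go_no_sep (l : List Char) (fuel : Nat) (cur : List Char) (acc : List (List Char))
    (h : '_' ∉ l) (hf : l.length ≤ fuel) :
    PySem.Chars.splitOn.go ['_'] fuel l cur acc = ((cur.reverse ++ l) :: acc).reverse := by
  induction l generalizing fuel cur acc with
  | nil =>
      cases fuel with
      | zero => simp [PySem.Chars.splitOn.go]
      | succ n => simp [PySem.Chars.splitOn.go]
  | cons c rest ih =>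
      cases fuel with
      | zero => simp at hf
      | succ n =>
          have hne : '_' ≠ c := fun he => h (by rw [he]; simp)
          have hc : ('_' == c) = false := beq_eq_false_iff_ne.mpr hne
          have hstep : PySem.Chars.splitOn.go ['_'] (n+1) (c :: rest) cur acc
              = PySem.Chars.splitOn.go ['_'] n rest (c :: cur) acc := by
            rw [PySem.Chars.splitOn.go]; simp [List.isPrefixOf, hc]
          rw [hstep, ih n (c :: cur) acc (fun hm => h (List.mem_cons_of_mem _ hm))
              (Nat.le_of_succ_le_succ hf)]
          simp

-- no '_' in s  ⇒  s.split('_') = [s]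
theorem pv_splitU_no_sep (s : String) (h : '_' ∉ s.toList) : pvSplitU s = [s] := by
  unfold pvSplitU PySem.Chars.splitOn
  rw [pv_go_no_sep _ _ _ _ h (Nat.le_succ _)]
  simp [String.ofList_toList]

-- A's conditional prefix equals the unconditional split head
theorem pv_pref_eq (s : String) :
    (if PySem.Str.isIn "_" s then keyPre s else s) = keyPre s := by
  cases hin : PySem.Str.isIn "_" s with
  | true => simp
  | false =>
      have hmem : '_' ∉ s.toList := by
        intro hm
        rcases List.append_of_mem hm with ⟨u, v, huv⟩
        have hinf : ('_' :: []) <:+: s.toList := ⟨u, v, by rw [huv]; simp⟩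
        rw [PySem.Str.isIn_eq] at hin
        have h2 : ("_" : String).toList = ['_'] := rfl
        rw [h2] at hin
        exact (PySem.Chars.isIn_eq_false_iff _ _).mp hin hinf
      have hsp : pvSplitU s = [s] := pv_splitU_no_sep s hmem
      simp only [Bool.false_eq_true, if_false]
      unfold keyPre
      rw [hsp]
      simp [PySem.List.pyGetD]

-- keys stay Nodup through the deduplicating setdefault fold
theorem pv_setdefault_fold_nodup (l : List (String × Int)) (d : PySem.Dict String Int)
    (hd : d.keys.Nodup) :
    (l.foldl (fun d p => d.setdefault p.1 p.2) d).keys.Nodup := by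
  induction l generalizing d with
  | nil => simpa using hd
  | cons a t ih =>
      simp only [List.foldl_cons]
      apply ih
      cases hc : d.contains a.1 with
      | true => rw [PySem.Dict.setdefault_of_contains d a.2 hc]; exact hd
      | false =>
          rw [PySem.Dict.setdefault_of_not_contains d a.2 hc]
          exact PySem.Dict.nodup_keys_insert d a.1 a.2 hd

theorem pv_nodup_items_fst (offsets : List (String × Int)) :
    ((pvItems offsets).map (fun x => x.1)).Nodup := by
  have h := pv_setdefault_fold_nodup offsets PySem.Dict.empty PySem.Dict.nodup_keys_empty
  exact h

-- one grouping step: effect on getD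
theorem pv_step_getD (g : PySem.Dict String (List (String × Int))) (nv : String × Int) (p : String) :
    (pvG g nv).getD p [] = if p = keyPre nv.1 then g.getD p [] ++ [nv] else g.getD p [] := by
  unfold pvG
  cases hc : g.contains (keyPre nv.1) with
  | true =>
      rw [if_pos rfl, PySem.Dict.getD_modify]
      split_ifs with hpk
      · rw [hpk]
      · rfl
  | false =>
      simp only [Bool.false_eq_true, if_false]
      rw [PySem.Dict.getD_modify]
      by_cases hpk : p = keyPre nv.1
      · rw [if_pos hpk, if_pos hpk, hpk, PySem.Dict.getD_insert_self,
            PySem.Dict.getD_of_not_contains g [] hc]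
      · rw [if_neg hpk, if_neg hpk, PySem.Dict.getD_insert_of_ne _ _ _ hpk]

-- one grouping step: effect on keys
theorem pv_step_keys (g : PySem.Dict String (List (String × Int))) (nv : String × Int) :
    (pvG g nv).keys = PySem.Set.add g.keys (keyPre nv.1) := by
  unfold pvG
  cases hc : g.contains (keyPre nv.1) with
  | true =>
      rw [if_pos rfl]
      rw [PySem.Dict.keys_modify, PySem.Dict.keys_insert_of_contains g _ hc]
      have hk : keyPre nv.1 ∈ g.keys := (PySem.Dict.contains_iff_mem_keys g _).mp hc
      simp [PySem.Set.add, PySem.Set.contains, hk]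
  | false =>
      simp only [Bool.false_eq_true, if_false]
      rw [PySem.Dict.keys_modify,
          PySem.Dict.keys_insert_of_contains _ _ (PySem.Dict.contains_insert_self g _ _),
          PySem.Dict.keys_insert_of_not_contains g _ hc]
      have hk : keyPre nv.1 ∉ g.keys := fun hm =>
        by rw [(PySem.Dict.contains_iff_mem_keys g _).mpr hm] at hc; cases hc
      simp [PySem.Set.add, PySem.Set.contains, hk]

-- the grouping fold, characterised
theorem pv_foldl_getD (l : List (String × Int)) (g : PySem.Dict String (List (String × Int)))
    (p : String) :
    (l.foldl pvG g).getD p []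
    = g.getD p [] ++ l.filter (fun nv => decide (keyPre nv.1 = p)) := by
  induction l generalizing g with
  | nil => simp
  | cons nv t ih =>
      rw [List.foldl_cons, ih, pv_step_getD, List.filter_cons]
      by_cases h : p = keyPre nv.1
      · rw [if_pos h]
        have : (decide (keyPre nv.1 = p)) = true := by simp [h]
        rw [this]
        simp
      · rw [if_neg h]
        have : (decide (keyPre nv.1 = p)) = false := by simp; exact fun e => h e.symm
        rw [this]
        simp

theorem pv_foldl_keys (l : List (String × Int)) (g : PySem.Dict String (List (String × Int))) :
    (l.foldl pvG g).keys = PySem.Set.update g.keys (l.map (fun nv => keyPre nv.1)) := by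
  induction l generalizing g with
  | nil => rfl
  | cons nv t ih =>
      rw [List.foldl_cons, ih, pv_step_keys, List.map_cons]
      rfl

-- flatMap of per-prefix filters over all occurring prefixes is a permutation
theorem pv_flatMap_filter_perm (ps : List String) (l : List (String × Int))
    (hnd : ps.Nodup) (hcov : ∀ x ∈ l, keyPre x.1 ∈ ps) :
    (ps.flatMap (fun p => l.filter (fun nv => decide (keyPre nv.1 = p)))).Perm l := by
  induction ps generalizing l with
  | nil =>
      have hl : l = [] := by
        cases l with
        | nil => rfl
        | cons a t => exact absurd (hcov a (by simp)) (by simp)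
      simp [hl]
  | cons p ps ih =>
      rw [List.flatMap_cons]
      have hnotin : p ∉ ps := (List.nodup_cons.mp hnd).1
      have hrw : ps.flatMap (fun q => l.filter (fun nv => decide (keyPre nv.1 = q)))
          = ps.flatMap (fun q =>
              (l.filter (fun nv => !decide (keyPre nv.1 = p))).filter
                (fun nv => decide (keyPre nv.1 = q))) := by
        rw [List.flatMap_def, List.flatMap_def]
        congr 1
        apply List.map_congr_left
        intro q hq
        rw [List.filter_filter]
        have hfun : (fun nv : String × Int => decide (keyPre nv.1 = q))
            = (fun nv => decide (keyPre nv.1 = q) && !decide (keyPre nv.1 = p)) := by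
          funext nv
          by_cases hv : keyPre nv.1 = q
          · have hqp : ¬ q = p := fun e => hnotin (e ▸ hq)
            simp [hv, hqp]
          · simp [hv]
        rw [← hfun]
      rw [hrw]
      have hcov' : ∀ x ∈ l.filter (fun nv => !decide (keyPre nv.1 = p)), keyPre x.1 ∈ ps := by
        intro x hx
        have hxp : ¬ (keyPre x.1 = p) := by simpa using List.of_mem_filter hx
        rcases List.mem_cons.mp (hcov x (List.mem_of_mem_filter hx)) with h | h
        · exact absurd h hxp
        · exact h
      exact (List.Perm.append_left _ (ih _ (List.nodup_cons.mp hnd).2 hcov')).trans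
        (List.filter_append_perm _ l)

-- sorted2 with two keys is sorted with the lexicographic key
theorem pv_sorted2_eq_sorted_lex {α : Type} (xs : List α) (k1 k2 : α → String) :
    PySem.List.sorted2 xs k1 k2 false
    = PySem.List.sorted xs (fun x => toLex (k1 x, k2 x)) false := by
  have hb : (fun a b : α => decide (k1 a < k1 b) || (!decide (k1 b < k1 a) && decide (k2 a < k2 b)))
      = (fun a b : α => decide (toLex (k1 a, k2 a) < toLex (k1 b, k2 b))) := by
    funext a b
    by_cases h1 : k1 a < k1 b
    · simp [h1, Prod.Lex.lt_iff]
    · by_cases h2 : k1 b < k1 a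
      · have hne : ¬ (k1 a = k1 b) := fun e => absurd (e ▸ h2) (lt_irrefl _)
        simp [h1, h2, Prod.Lex.lt_iff, hne]
      · have he : k1 a = k1 b := le_antisymm (not_lt.mp h2) (not_lt.mp h1)
        simp [Prod.Lex.lt_iff, he]
  simp only [PySem.List.sorted2, PySem.List.sorted, Bool.false_eq_true, if_false]
  rw [hb]

-- pairwise ≤ on a key plus nodup of the mapped keys gives pairwise <
theorem pv_pairwise_lt_of_le_nodup {α κ : Type} [LinearOrder κ] (l : List α) (key : α → κ)
    (hle : l.Pairwise (fun a b => key a ≤ key b)) (hnd : (l.map key).Nodup) :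
    l.Pairwise (fun a b => key a < key b) := by
  have hne : l.Pairwise (fun a b => key a ≠ key b) := List.pairwise_map.mp hnd
  exact (hle.and hne).imp (fun h => lt_of_le_of_ne h.1 h.2)

-- characterisation of port A's value
theorem pv_A_char (offsets : List (String × Int)) :
    generate_spec_offsets_cs offsets
    = PySem.Str.join "\n"
        ((pvHeader ++ (pvKeysSorted offsets).flatMap
            (fun p => ((pvS offsets).filter (fun nv => decide (keyPre nv.1 = p))).map pvLineF))
          ++ ["}"]) := by
  simp only [generate_spec_offsets_cs, pvKeysSorted, pvS, pvHeader]
  have hG : (fun (g : PySem.Dict String (List (String × Int))) (nv : String × Int) =>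
        let pfx := if PySem.Str.isIn "_" nv.1 then keyPre nv.1 else nv.1
        let g' := if g.contains pfx then g else g.insert pfx []
        g'.modify pfx [] (fun l => l ++ [nv])) = pvG := by
    funext g nv
    show (let pfx := if PySem.Str.isIn "_" nv.1 then keyPre nv.1 else nv.1
          let g' := if g.contains pfx then g else g.insert pfx []
          g'.modify pfx [] (fun l => l ++ [nv])) = pvG g nv
    rw [pv_pref_eq]
    rfl
  rw [hG]
  rw [pv_foldl_keys, PySem.Dict.keys_empty, PySem.Set.update_nil_left]
  have houter : (fun (ls : List String) (pfx : String) =>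
      (((PySem.List.sorted (pvItems offsets) (fun x => x.1) false).foldl pvG
          PySem.Dict.empty).getD pfx []).foldl
        (fun ls (nv : String × Int) =>
          let cs_name := to_pascal_case_port nv.1
          ls ++ ["    public const int " ++ cs_name ++ " = " ++ PySem.Int.toStr nv.2 ++ ";"]) ls)
      = (fun ls pfx => ls ++ ((PySem.List.sorted (pvItems offsets) (fun x => x.1) false).filter
          (fun nv => decide (keyPre nv.1 = pfx))).map pvLineF) := by
    funext ls pfx
    rw [pv_foldl_getD, PySem.Dict.getD_empty]
    rw [show (fun (ls : List String) (nv : String × Int) =>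
          let cs_name := to_pascal_case_port nv.1
          ls ++ ["    public const int " ++ cs_name ++ " = " ++ PySem.Int.toStr nv.2 ++ ";"])
        = (fun acc nv => acc ++ [pvLineF nv]) from rfl]
    rw [PySem.List.foldl_append_singleton_eq_map]
    simp
  rw [houter, PySem.List.foldl_append_eq_flatMap]

-- characterisation of port B's value
theorem pv_B_char (offsets : List (String × Int)) :
    generate_spec_offsets_cs_alt offsets
    = PySem.Str.join "\n"
        (pvHeader ++ ((PySem.List.sorted (pvItems offsets)
            (fun x => toLex (keyPre x.1, x.1)) false).map pvLineF ++ ["}"])) := by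
  simp only [generate_spec_offsets_cs_alt]
  rw [pv_sorted2_eq_sorted_lex]
  rfl

-- the core: one composite sort equals sort → group → sort keys → concatenate
theorem pv_core (offsets : List (String × Int)) :
    PySem.List.sorted (pvItems offsets) (fun x => toLex (keyPre x.1, x.1)) false
    = (pvKeysSorted offsets).flatMap
        (fun p => (pvS offsets).filter (fun nv => decide (keyPre nv.1 = p))) := by
  have hndps : (pvKeysSorted offsets).Nodup :=
    (PySem.List.sorted_perm _ _ _).symm.nodup (PySem.Set.nodup_ofList _)
  have hcov : ∀ x ∈ pvS offsets, keyPre x.1 ∈ pvKeysSorted offsets := by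
    intro x hx
    exact (PySem.List.mem_sorted _ _ _ _).mpr
      ((PySem.Set.mem_ofList _ _).mpr (List.mem_map_of_mem hx))
  have hperm : ((pvKeysSorted offsets).flatMap
      (fun p => (pvS offsets).filter (fun nv => decide (keyPre nv.1 = p)))).Perm
      (pvItems offsets) :=
    (pv_flatMap_filter_perm _ _ hndps hcov).trans (PySem.List.sorted_perm _ _ _)
  have hnames : ((pvS offsets).map (fun x => x.1)).Nodup :=
    (((PySem.List.sorted_perm (pvItems offsets) (fun x : String × Int => x.1) false).map
        (fun x => x.1)).symm).nodup (pv_nodup_items_fst offsets)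
  have hspw : (pvS offsets).Pairwise (fun a b => a.1 < b.1) :=
    pv_pairwise_lt_of_le_nodup _ (fun x : String × Int => x.1)
      (PySem.List.sorted_pairwise (pvItems offsets) (fun x : String × Int => x.1)) hnames
  have hpskey : (pvKeysSorted offsets).Pairwise (fun a b => a < b) :=
    PySem.List.sorted_ofList_pairwise_lt _
  have hpw : ((pvKeysSorted offsets).flatMap
      (fun p => (pvS offsets).filter (fun nv => decide (keyPre nv.1 = p)))).Pairwise
      (fun a b => (fun x : String × Int => toLex (keyPre x.1, x.1)) a
        < (fun x : String × Int => toLex (keyPre x.1, x.1)) b) := by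
    apply List.pairwise_flatMap.mpr
    constructor
    · intro p _
      apply List.pairwise_filter.mpr
      refine hspw.imp ?_
      intro a b hab ha hb
      have ha' : keyPre a.1 = p := by simpa using ha
      have hb' : keyPre b.1 = p := by simpa using hb
      exact Prod.Lex.lt_iff.mpr (Or.inr ⟨by simp [ha', hb'], by simpa using hab⟩)
    · refine hpskey.imp ?_
      intro p q hpq x hx y hy
      have hx' : keyPre x.1 = p := by simpa using List.of_mem_filter hx
      have hy' : keyPre y.1 = q := by simpa using List.of_mem_filter hy
      exact Prod.Lex.lt_iff.mpr (Or.inl (by simpa [hx', hy'] using hpq))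
  exact PySem.List.sorted_eq_of_perm_of_pairwise_lt _ _ _ hperm hpw

-- ===== VERDICT (by name: the statement is the Claim_ definition above) =====
theorem generate_spec_offsets_cs_spec : Claim_equal_generate_spec_offsets_cs := by
  intro offsets _
  unfold Spec_generate_spec_offsets_cs
  rw [pv_A_char, pv_B_char, pv_core, List.map_flatMap]
  simp [List.append_assoc]
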